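-- pv_equiv track=rewrite | github.com/axeleratio/CurlySMILESpy | csm_molform.py | split_labelled_atsymb
-- ===== SOURCE A (Python) =====
-- def split_labelled_atsymb(sAtSymb):
--    sLabel = ''
--    sSymb  = ''
--    bDoSymb = 0
--    for cChar in sAtSymb:
--       if cChar.isupper():
--          bDoSymb = 1
--          sSymb += cChar
--       elif bDoSymb == 1:
--          sSymb += cChar
--       else:
--          sLabel += cChar
--    return [sLabel,sSymb]
-- ===== SOURCE B (Python) =====
-- def split_labelled_atsymb(sAtSymb):
--    i = next((j for j, c in enumerate(sAtSymb) if c.isupper()), len(sAtSymb))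
--    return [sAtSymb[:i], sAtSymb[i:]]
-- ===== Notes on version B (the rewrite author's own statement) =====
-- stated objective: simpler
-- what changed: Replaces the flag-driven character-by-character accumulation with computing the index of the first uppercase character and returning the two slices around it.
import Mathlib
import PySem

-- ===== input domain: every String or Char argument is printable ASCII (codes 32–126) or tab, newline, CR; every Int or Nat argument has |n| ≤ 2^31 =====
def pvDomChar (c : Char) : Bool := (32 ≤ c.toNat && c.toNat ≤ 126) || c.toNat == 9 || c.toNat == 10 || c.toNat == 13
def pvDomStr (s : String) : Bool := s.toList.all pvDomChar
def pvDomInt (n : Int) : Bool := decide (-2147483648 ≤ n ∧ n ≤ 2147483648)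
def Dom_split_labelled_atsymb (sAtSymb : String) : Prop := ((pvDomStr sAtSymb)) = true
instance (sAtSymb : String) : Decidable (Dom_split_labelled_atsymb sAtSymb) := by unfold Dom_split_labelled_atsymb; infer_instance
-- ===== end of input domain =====

-- ===== PORT A =====
-- B computes the first-uppercase index and slices; A accumulates char by char with a flag.
def atsymbLoop : List Char → String → String → Bool → List String
  | [], sLabel, sSymb, _ => [sLabel, sSymb]
  | cChar :: rest, sLabel, sSymb, bDoSymb =>
    if cChar.isUpper then atsymbLoop rest sLabel (sSymb.push cChar) true
    else if bDoSymb then atsymbLoop rest sLabel (sSymb.push cChar) bDoSymb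
    else atsymbLoop rest (sLabel.push cChar) sSymb bDoSymb

def split_labelled_atsymb (sAtSymb : String) : List String :=
  atsymbLoop sAtSymb.toList "" "" false

-- ===== PORT B =====
def split_labelled_atsymb_alt (sAtSymb : String) : List String :=
  let i := sAtSymb.toList.findIdx Char.isUpper
  [String.ofList (sAtSymb.toList.take i), String.ofList (sAtSymb.toList.drop i)]

-- ===== PRECONDITION & SPEC =====
def Spec_split_labelled_atsymb (sAtSymb : String) (out : List String) : Prop := out = split_labelled_atsymb_alt sAtSymb
instance (sAtSymb : String) (out : List String) : Decidable (Spec_split_labelled_atsymb sAtSymb out) := by unfold Spec_split_labelled_atsymb; infer_instance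

-- ===== CLAIM (what is proved, stated in full; the proofs are below) =====
def Claim_equal_split_labelled_atsymb : Prop := ∀ (sAtSymb : String), Dom_split_labelled_atsymb sAtSymb → Spec_split_labelled_atsymb sAtSymb (split_labelled_atsymb sAtSymb)

-- ===== LEMMAS AND PROOFS =====

-- ===== VERDICT (by name: the statement is the Claim_ definition above) =====
-- strings are compared through their character lists
theorem str_eq_of_toList {s t : String} (h : s.toList = t.toList) : s = t :=
  String.toList_inj.mp h

theorem push_ofList_cons (c : Char) (l : List Char) :
    "".push c ++ String.ofList l = String.ofList (c :: l) :=
  str_eq_of_toList (by simp)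

theorem push_append_ofList (s : String) (c : Char) (l : List Char) :
    s.push c ++ String.ofList l = s ++ String.ofList (c :: l) :=
  str_eq_of_toList (by simp)

theorem atsymbLoop_true (l : List Char) : ∀ (sL sS : String),
    atsymbLoop l sL sS true = [sL, sS ++ String.ofList l] := by
  induction l with
  | nil => intro sL sS; simp [atsymbLoop]
  | cons c rest ih =>
    intro sL sS
    by_cases h : c.isUpper <;>
      simp [atsymbLoop, h, ih, push_append_ofList]

theorem atsymbLoop_false (l : List Char) : ∀ (sL : String),
    atsymbLoop l sL "" false =
      [sL ++ String.ofList (l.take (l.findIdx Char.isUpper)),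
       String.ofList (l.drop (l.findIdx Char.isUpper))] := by
  induction l with
  | nil =>
    intro sL
    simp [atsymbLoop]
  | cons c rest ih =>
    intro sL
    by_cases h : c.isUpper
    · have h0 : (c :: rest).findIdx Char.isUpper = 0 := by simp [List.findIdx_cons, h]
      rw [atsymbLoop, if_pos h, atsymbLoop_true, h0]
      simp [push_ofList_cons]
    · have h1 : (c :: rest).findIdx Char.isUpper = rest.findIdx Char.isUpper + 1 := by
        simp [List.findIdx_cons, h]
      rw [atsymbLoop, if_neg (by simp [h]), if_neg (by simp), ih, h1]
      simp [push_append_ofList]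

theorem split_labelled_atsymb_spec : Claim_equal_split_labelled_atsymb := by
  intro s _
  unfold Spec_split_labelled_atsymb split_labelled_atsymb split_labelled_atsymb_alt
  rw [atsymbLoop_false]
  simp
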